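-- pv_equiv track=rewrite | github.com/Rahul2k5/cf_codes | oI.py | game
-- ===== SOURCE A (Python) =====
-- def game(s):
--     count = 0
--     i = 0
--     while i < len(s) - 1:
--         if s[i:i+2] == "10" or s[i:i+2] == "01":
--             s = s[:i] + s[i+2:]
--             count += 1
--             i = max(i - 1, 0)
--         else:
--             i += 1
--     if count % 2 == 0:
--         return "NET"
--     return "DA"
-- ===== SOURCE B (Python) =====
-- def game(s):
--     removals = 0
--     zeros = 0
--     ones = 0
--     for ch in s:
--         if ch == '0':
--             zeros += 1
--         elif ch == '1':
--             ones += 1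
--         else:
--             removals += min(zeros, ones)
--             zeros = 0
--             ones = 0
--     removals += min(zeros, ones)
--     return "NET" if removals % 2 == 0 else "DA"
-- ===== Notes on version B (the rewrite author's own statement) =====
-- stated objective: faster
-- what changed: Replaces the quadratic remove-and-rescan loop over string slices by a single linear pass that counts zeros and ones per maximal binary segment and sums min(zeros, ones), which equals the number of removals.
import Mathlib
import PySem

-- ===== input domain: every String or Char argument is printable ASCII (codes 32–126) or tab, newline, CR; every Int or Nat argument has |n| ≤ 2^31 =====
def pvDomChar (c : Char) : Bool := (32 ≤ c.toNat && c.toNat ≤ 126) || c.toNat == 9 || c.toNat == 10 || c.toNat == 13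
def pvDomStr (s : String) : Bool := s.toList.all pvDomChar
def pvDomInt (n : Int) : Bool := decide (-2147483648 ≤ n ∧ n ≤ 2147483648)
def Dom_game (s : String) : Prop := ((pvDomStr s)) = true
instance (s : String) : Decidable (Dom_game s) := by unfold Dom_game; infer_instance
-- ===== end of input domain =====

-- B replaces A's quadratic remove-and-rescan loop by one linear pass summing
-- min(zeros, ones) over maximal binary segments (objective: faster, asymptotic).

-- ===== PORT A =====
-- Python's while loop, as well-founded recursion on 2*len(s) - i.  The Python int
-- index i starts at 0 and is updated by max(i-1,0) / i+1, so it is always ≥ 0 and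
-- is carried as a Nat (truncated i-1 = max(i-1,0)); the condition i < len(s)-1
-- agrees with the Int condition since for len(s)=0 both sides are false at i=0.
def gameLoop : Nat → List Char → Nat → Nat → Nat
  | 0, _, _, count => count
  | fuel+1, s, i, count =>
    if i < s.length - 1 then
      if ((s.drop i).take 2 = ['1','0'] ∨ (s.drop i).take 2 = ['0','1']) then
        gameLoop fuel (s.take i ++ s.drop (i+2)) (i - 1) (count + 1)
      else
        gameLoop fuel s (i + 1) count
    else count

def game (s : String) : String :=
  let count := gameLoop (2 * s.toList.length + 1) s.toList 0 0
  if count % 2 = 0 then "NET" else "DA"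

-- ===== PORT B =====
-- state: (removals, zeros, ones)
def altStep (st : Nat × Nat × Nat) (c : Char) : Nat × Nat × Nat :=
  if c = '0' then (st.1, st.2.1 + 1, st.2.2)
  else if c = '1' then (st.1, st.2.1, st.2.2 + 1)
  else (st.1 + min st.2.1 st.2.2, 0, 0)

def game_alt (s : String) : String :=
  let st := s.toList.foldl altStep (0, 0, 0)
  let removals := st.1 + min st.2.1 st.2.2
  if removals % 2 = 0 then "NET" else "DA"

-- ===== PRECONDITION & SPEC =====
def Spec_game (s : String) (out : String) : Prop := out = game_alt s
instance (s : String) (out : String) : Decidable (Spec_game s out) := by unfold Spec_game; infer_instance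

-- ===== CLAIM (what is proved, stated in full; the proofs are below) =====
def Claim_equal_game : Prop := ∀ (s : String), Dom_game s → Spec_game s (game s)

-- ===== LEMMAS AND PROOFS =====

-- remaining removals of a suffix, given the zero/one counts of the current block so far
def go : List Char → Nat → Nat → Nat
  | [], z, o => min z o
  | c :: t, z, o =>
    if c = '0' then go t (z+1) o
    else if c = '1' then go t z (o+1)
    else min z o + go t 0 0

def isBadW (w : List Char) : Prop := w = ['1','0'] ∨ w = ['0','1']

def LoopInv (s : List Char) (i : Nat) : Prop := ∀ j, j < i → ¬ isBadW ((s.drop j).take 2)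

theorem fold_go (l : List Char) : ∀ r z o,
    ((l.foldl altStep (r, z, o)).1 + min (l.foldl altStep (r, z, o)).2.1 (l.foldl altStep (r, z, o)).2.2)
      = r + go l z o := by
  induction l with
  | nil => intro r z o; simp [go]
  | cons c t ih =>
    intro r z o
    simp only [List.foldl_cons, altStep, go]
    split_ifs with h1 h2
    · exact ih r (z+1) o
    · exact ih r z (o+1)
    · rw [ih]; omega

theorem go_succ_succ (v : List Char) : ∀ z o, go v (z+1) (o+1) = go v z o + 1 := by
  induction v with
  | nil => intro z o; simp only [go]; omega
  | cons c t ih =>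
    intro z o
    simp only [go]
    split_ifs with h1 h2
    · exact ih (z+1) o
    · exact ih z (o+1)
    · omega

theorem go_remove_pair (a b : Char) (hb : isBadW [a, b]) (v : List Char) :
    ∀ u z o, go (u ++ a :: b :: v) z o = go (u ++ v) z o + 1 := by
  intro u
  induction u with
  | nil =>
    intro z o
    rcases hb with h | h
    · obtain ⟨rfl, rfl⟩ : a = '1' ∧ b = '0' := by simpa using h
      simp [go, go_succ_succ]
    · obtain ⟨rfl, rfl⟩ : a = '0' ∧ b = '1' := by simpa using h
      simp [go, go_succ_succ]
  | cons c t ih =>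
    intro z o
    simp only [List.cons_append, go]
    split_ifs <;> simp [ih] <;> omega

theorem go_nobad (l : List Char) (hnb : ∀ j, ¬ isBadW ((l.drop j).take 2)) :
    (∀ z, l.head? ≠ some '1' → go l z 0 = 0) ∧ (∀ o, l.head? ≠ some '0' → go l 0 o = 0) := by
  induction l with
  | nil => constructor <;> intro _ _ <;> simp [go]
  | cons c t ih =>
    have hnt : ∀ j, ¬ isBadW ((t.drop j).take 2) := by
      intro j; exact hnb (j+1)
    have iht := ih hnt
    have h0 := hnb 0
    have hgot0 : t.head? ≠ some '1' ∨ t.head? ≠ some '0' := by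
      by_cases h : t.head? = some '1'
      · right; rw [h]; simp
      · left; exact h
    have hgo00 : go t 0 0 = 0 := by
      rcases hgot0 with h | h
      · exact iht.1 0 h
      · exact iht.2 0 h
    constructor
    · intro z hc
      have hc' : c ≠ '1' := by simpa using hc
      by_cases h0c : c = '0'
      · subst h0c
        simp only [go, reduceIte]
        apply iht.1
        intro hhd
        cases t with
        | nil => simp at hhd
        | cons d t' =>
          simp only [List.head?_cons, Option.some.injEq] at hhd
          subst hhd
          exact h0 (by right; simp)
      · simp only [go, if_neg h0c, if_neg hc']
        simp [hgo00]
    · intro o hc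
      have hc' : c ≠ '0' := by simpa using hc
      by_cases h1c : c = '1'
      · subst h1c
        simp only [go, reduceIte]
        apply iht.2
        intro hhd
        cases t with
        | nil => simp at hhd
        | cons d t' =>
          simp only [List.head?_cons, Option.some.injEq] at hhd
          subst hhd
          exact h0 (by left; simp)
      · simp only [go, if_neg hc', if_neg h1c]
        simp [hgo00]

theorem go_nobad_zero (l : List Char) (hnb : ∀ j, ¬ isBadW ((l.drop j).take 2)) :
    go l 0 0 = 0 := by
  rcases go_nobad l hnb with ⟨h1, h2⟩
  by_cases h : l.head? = some '1'
  · exact h2 0 (by rw [h]; simp)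
  · exact h1 0 h

theorem drop_decomp (s : List Char) (i : Nat) (a b : Char)
    (hw : (s.drop i).take 2 = [a, b]) :
    s.drop i = a :: b :: s.drop (i + 2) := by
  have h1 : s.drop i = (s.drop i).take 2 ++ (s.drop i).drop 2 := (List.take_append_drop 2 _).symm
  rw [hw] at h1
  rw [h1, List.drop_drop]
  simp

theorem gameLoop_go : ∀ (fuel : Nat) (s : List Char) (i count : Nat),
    2 * s.length - i < fuel → LoopInv s i → gameLoop fuel s i count = count + go s 0 0 := by
  intro fuel
  induction fuel with
  | zero => intro s i count hf _; omega
  | succ fuel ih =>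
    intro s i count hf hinv
    simp only [gameLoop]
    split_ifs with h hw
    · -- removal case
      have hlen : i + 2 ≤ s.length := by omega
      obtain ⟨a, b, hab, hw'⟩ : ∃ a b, isBadW [a, b] ∧ (s.drop i).take 2 = [a, b] := by
        rcases hw with h' | h'
        · exact ⟨'1', '0', Or.inl rfl, h'⟩
        · exact ⟨'0', '1', Or.inr rfl, h'⟩
      have hd := drop_decomp s i a b hw'
      have hs : s = s.take i ++ a :: b :: s.drop (i + 2) := by
        conv_lhs => rw [← List.take_append_drop i s]
        rw [hd]
      have hrec : gameLoop fuel (s.take i ++ s.drop (i+2)) (i - 1) (count + 1)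
          = (count + 1) + go (s.take i ++ s.drop (i+2)) 0 0 := by
        apply ih
        · simp only [List.length_append, List.length_take, List.length_drop]
          omega
        · intro j hj
          have hij : j + 2 ≤ i := by omega
          have hlt : i ≤ s.length := by omega
          have hdp : (s.take i ++ s.drop (i+2)).drop j = (s.take i).drop j ++ s.drop (i+2) := by
            rw [List.drop_append_of_le_length]
            simp; omega
          have hlen2 : 2 ≤ ((s.take i).drop j).length := by
            simp; omega
          have htk : ((s.take i ++ s.drop (i+2)).drop j).take 2 = ((s.take i).drop j).take 2 := by
            rw [hdp, List.take_append_of_le_length hlen2]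
          have htk2 : ((s.take i).drop j).take 2 = ((s.drop j).take 2) := by
            rw [List.drop_take, List.take_take]
            congr 1
            omega
          rw [htk, htk2]
          exact hinv j (by omega)
      rw [hrec]
      have hgo : go s 0 0 = go (s.take i ++ s.drop (i+2)) 0 0 + 1 := by
        conv_lhs => rw [hs]
        exact go_remove_pair a b hab _ _ 0 0
      omega
    · -- no removal, advance
      apply ih
      · omega
      · intro j hj
        by_cases hji : j < i
        · exact hinv j hji
        · have : j = i := by omega
          subst this
          intro hbad
          exact hw hbad
    · -- loop ends: no bad window anywhere
      have hnb : ∀ j, ¬ isBadW ((s.drop j).take 2) := by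
        intro j
        by_cases hj : j < i
        · exact hinv j hj
        · intro hbad
          have hlen2 : ((s.drop j).take 2).length ≤ 1 := by
            simp only [List.length_take, List.length_drop]
            omega
          rcases hbad with h' | h' <;> rw [h'] at hlen2 <;> simp at hlen2
      rw [go_nobad_zero s hnb]
      omega

-- ===== VERDICT (by name: the statement is the Claim_ definition above) =====
theorem game_spec : Claim_equal_game := by
  intro s _
  have h1 : gameLoop (2 * s.toList.length + 1) s.toList 0 0 = 0 + go s.toList 0 0 :=
    gameLoop_go _ s.toList 0 0 (by omega) (by intro j hj; omega)
  have h2 := fold_go s.toList 0 0 0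
  have h3 : gameLoop (2 * s.toList.length + 1) s.toList 0 0
      = (s.toList.foldl altStep (0, 0, 0)).1
        + min (s.toList.foldl altStep (0, 0, 0)).2.1 (s.toList.foldl altStep (0, 0, 0)).2.2 := by
    rw [h1, h2]
  show game s = game_alt s
  unfold game game_alt
  rw [h3]
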